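-- pv_equiv track=rewrite | github.com/rchmielarz/wprawki-programistyczne | advent_of_code2017/day6.py | redistribute_memory
-- ===== SOURCE A (Python) =====
-- def redistribute_memory(memory):
--     value = max(memory)
--     index = memory.index(value)
--     redistributed = memory.copy()
--     redistributed[index] = 0
--     while value > 0:
--         if index == len(redistributed) - 1:
--             index = 0
--         else:
--             index += 1
--         redistributed[index] += 1
--         value -= 1
--     return redistributed
-- ===== SOURCE B (Python) =====
-- def redistribute_memory(memory):
--     n = len(memory)
--     value = max(memory)
--     index = memory.index(value)
--     q, r = divmod(value, n) if value > 0 else (0, 0)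
--     out = []
--     for i, v in enumerate(memory):
--         d = (i - index - 1) % n
--         out.append((0 if i == index else v) + q + (1 if d < r else 0))
--     return out
-- ===== Notes on version B (the rewrite author's own statement) =====
-- stated objective: faster
-- what changed: A distributes the max one block at a time in a while loop running max(memory) iterations; B computes the result in closed form with divmod: every slot gets value//n and the value%n slots cyclically after the max's index get one extra.
-- outside the precondition, e.g. on redistribute_memory([]): A raises ValueError, B raises ValueError
import Mathlib
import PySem

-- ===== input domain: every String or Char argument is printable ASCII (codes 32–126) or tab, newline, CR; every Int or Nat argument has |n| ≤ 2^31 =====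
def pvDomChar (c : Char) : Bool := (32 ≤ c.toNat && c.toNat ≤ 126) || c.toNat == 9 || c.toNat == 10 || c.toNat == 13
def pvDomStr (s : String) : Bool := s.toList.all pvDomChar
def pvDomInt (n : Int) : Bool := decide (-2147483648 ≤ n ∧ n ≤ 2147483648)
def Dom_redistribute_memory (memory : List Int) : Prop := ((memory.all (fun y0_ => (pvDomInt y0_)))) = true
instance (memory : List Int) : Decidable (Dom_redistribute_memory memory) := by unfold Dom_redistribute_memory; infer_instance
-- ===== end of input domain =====

-- B replaces A's one-block-at-a-time while loop (O(max(memory)) steps) by the closed form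
-- value = q*n + r: every slot gets +q and the r slots after the max's index get +1 (O(n)).

-- ===== PORT A =====
-- the while loop: index stays in [0, red.length) because the wrap-around is explicit in the code
def redistLoopA (value : Int) (index : Nat) (red : List Int) : List Int :=
  if 0 < value then
    redistLoopA (value - 1) (if index = red.length - 1 then 0 else index + 1)
      (red.set (if index = red.length - 1 then 0 else index + 1)
        (red.getD (if index = red.length - 1 then 0 else index + 1) 0 + 1))
  else red
termination_by value.toNat
decreasing_by omega

def redistribute_memory (memory : List Int) : List Int :=
  match PySem.List.max? memory (fun y => y) with
  | none => []                      -- max([]) raises ValueError: excluded by Pre_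
  | some value =>
    match PySem.List.index? memory value with
    | none => []                    -- unreachable: the max is a member
    | some index => redistLoopA value index (memory.set index 0)

-- ===== PORT B =====
def redistribute_memory_alt (memory : List Int) : List Int :=
  match PySem.List.max? memory (fun y => y) with
  | none => []                      -- max([]) raises ValueError: excluded by Pre_
  | some value =>
    match PySem.List.index? memory value with
    | none => []                    -- unreachable: the max is a member
    | some index =>
      let n : Int := memory.length
      let q : Int := if 0 < value then PySem.Int.floordiv value n else 0
      let r : Int := if 0 < value then PySem.Int.mod value n else 0
      (PySem.List.enumerate memory 0).map (fun p =>
        (if p.1 = (index : Int) then 0 else p.2) + q +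
        (if PySem.Int.mod (p.1 - index - 1) n < r then 1 else 0))

-- ===== PRECONDITION & SPEC =====
-- Pre_ excludes only the empty list, on which Python's max([]) raises ValueError.
def Pre_redistribute_memory (memory : List Int) : Prop := memory ≠ []
instance (memory : List Int) : Decidable (Pre_redistribute_memory memory) := by
  unfold Pre_redistribute_memory; infer_instance
def pvWitness_redistribute_memory : List Int := [0, 2, 7, 0]

def Spec_redistribute_memory (memory : List Int) (out : List Int) : Prop := out = redistribute_memory_alt memory
instance (memory : List Int) (out : List Int) : Decidable (Spec_redistribute_memory memory out) := by unfold Spec_redistribute_memory; infer_instance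

-- ===== CLAIM (what is proved, stated in full; the proofs are below) =====
def Claim_equal_redistribute_memory : Prop := ∀ (memory : List Int), Dom_redistribute_memory memory → Pre_redistribute_memory memory → Spec_redistribute_memory memory (redistribute_memory memory)

-- ===== LEMMAS AND PROOFS =====

-- how many increments position i receives, mirroring the loop's traversal
def hits (value : Int) (index n i : Nat) : Int :=
  if 0 < value then
    (if i = (if index = n - 1 then 0 else index + 1) then 1 else 0) +
      hits (value - 1) (if index = n - 1 then 0 else index + 1) n i
  else 0
termination_by value.toNat
decreasing_by omega

lemma hits_nonpos (value : Int) (index n i : Nat) (h : ¬ 0 < value) :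
    hits value index n i = 0 := by
  rw [hits]; simp [h]

lemma emod_small (n x : Int) (hn : 0 < n) (h1 : -n ≤ x) (h2 : x < n) :
    x % n = if 0 ≤ x then x else x + n := by
  split_ifs with h
  · exact Int.emod_eq_of_lt h h2
  · have : x % n = (x + n * 1) % n := by rw [Int.add_mul_emod_self_left]
    rw [this]
    have : x + n * 1 = x + n := by ring
    rw [this]
    exact Int.emod_eq_of_lt (by omega) (by omega)

lemma emod_pred (n x : Int) (hn : 0 < n) :
    (x - 1) % n = if x % n = 0 then n - 1 else x % n - 1 := by
  have h := Int.emod_add_ediv x n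
  have hnn := Int.emod_nonneg x (by omega : n ≠ 0)
  have hlt := Int.emod_lt_of_pos x hn
  split_ifs with hz
  · have hx : x - 1 = (n - 1) + n * (x / n - 1) := by
      have e : n * (x / n - 1) = n * (x / n) - n := by ring
      omega
    rw [hx, Int.add_mul_emod_self_left]
    exact Int.emod_eq_of_lt (by omega) (by omega)
  · have hx : x - 1 = (x % n - 1) + n * (x / n) := by omega
    rw [hx, Int.add_mul_emod_self_left]
    exact Int.emod_eq_of_lt (by omega) (by omega)

lemma ediv_pred (n x : Int) (hn : 0 < n) :
    (x - 1) / n = if x % n = 0 then x / n - 1 else x / n := by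
  have h := Int.emod_add_ediv x n
  have hnn := Int.emod_nonneg x (by omega : n ≠ 0)
  have hlt := Int.emod_lt_of_pos x hn
  split_ifs with hz
  · have hx : x - 1 = (n - 1) + n * (x / n - 1) := by
      have e : n * (x / n - 1) = n * (x / n) - n := by ring
      omega
    rw [hx, Int.add_mul_ediv_left _ _ (by omega : n ≠ 0)]
    rw [Int.ediv_eq_zero_of_lt (by omega) (by omega)]
    omega
  · have hx : x - 1 = (x % n - 1) + n * (x / n) := by omega
    rw [hx, Int.add_mul_ediv_left _ _ (by omega : n ≠ 0)]
    rw [Int.ediv_eq_zero_of_lt (by omega) (by omega)]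
    omega

lemma hits_eq (n i : Nat) (hn : 0 < n) (hi : i < n) :
    ∀ (value : Int), 0 ≤ value → ∀ (index : Nat), index < n →
      hits value index n i =
        value / (n : Int) +
          (if ((i : Int) - index - 1) % n < value % n then 1 else 0) := by
  intro value hv
  induction value, hv using Int.le_induction with
  | base =>
      intro index hidx
      rw [hits_nonpos _ _ _ _ (by omega)]
      have hd : 0 ≤ ((i : Int) - index - 1) % n :=
        Int.emod_nonneg _ (by omega : (n : Int) ≠ 0)
      simp
      omega
  | succ v hv' ih =>
      intro index hidx
      have hn' : (0 : Int) < n := by exact_mod_cast hn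
      rw [hits]
      have hpos : (0 : Int) < v + 1 := by omega
      rw [if_pos hpos]
      have hidx' : (if index = n - 1 then 0 else index + 1) < n := by
        split_ifs <;> omega
      have hrec := ih (if index = n - 1 then 0 else index + 1) hidx'
      have hv1 : v + 1 - 1 = v := by ring
      rw [hv1] at *
      rw [hrec]
      -- express both distance-mods piecewise
      have hd : ((i : Int) - index - 1) % n =
          if 0 ≤ (i : Int) - index - 1 then (i : Int) - index - 1
          else (i : Int) - index - 1 + n := by
        apply emod_small _ _ hn' <;> push_cast <;> omega
      have hd' : ((i : Int) - (if index = n - 1 then 0 else index + 1) - 1) % n =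
          if 0 ≤ (i : Int) - (if index = n - 1 then 0 else index + 1) - 1
          then (i : Int) - (if index = n - 1 then 0 else index + 1) - 1
          else (i : Int) - (if index = n - 1 then 0 else index + 1) - 1 + n := by
        apply emod_small _ _ hn' <;> split_ifs <;> push_cast <;> omega
      -- (v+1) quantities in terms of v's: v = (v+1) - 1
      have hmod : v % (n : Int) =
          if (v + 1) % (n : Int) = 0 then (n : Int) - 1 else (v + 1) % (n : Int) - 1 := by
        have h := emod_pred (n : Int) (v + 1) hn'
        simpa using h
      have hdiv : v / (n : Int) =
          if (v + 1) % (n : Int) = 0 then (v + 1) / (n : Int) - 1 else (v + 1) / (n : Int) := by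
        have h := ediv_pred (n : Int) (v + 1) hn'
        simpa using h
      have hnn1 := Int.emod_nonneg (v + 1) (by omega : (n : Int) ≠ 0)
      have hlt1 := Int.emod_lt_of_pos (v + 1) hn'
      rw [hmod, hdiv, hd, hd']
      by_cases hb : index = n - 1 <;> simp only [hb, if_true, if_false] <;>
        split_ifs <;> push_cast at * <;> omega

lemma redistLoopA_length (value : Int) (index : Nat) (red : List Int) :
    (redistLoopA value index red).length = red.length := by
  induction value, index, red using redistLoopA.induct with
  | case1 value index red hpos ih =>
      simp only [dite_eq_ite] at ih
      rw [redistLoopA, if_pos hpos]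
      simpa using ih
  | case2 value index red hpos =>
      rw [redistLoopA, if_neg hpos]

lemma getD_set (l : List Int) (j : Nat) (a : Int) (i : Nat) (hj : j < l.length) :
    (l.set j a).getD i 0 = if j = i then a else l.getD i 0 := by
  simp only [List.getD, List.getElem?_set]
  split_ifs with h
  · subst h; simp [hj]
  · rfl

lemma redistLoopA_getD (value : Int) (index : Nat) (red : List Int)
    (hidx : index < red.length) (i : Nat) :
    (redistLoopA value index red).getD i 0 =
      red.getD i 0 + hits value index red.length i := by
  induction value, index, red using redistLoopA.induct with
  | case1 value index red hpos ih =>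
      simp only [dite_eq_ite] at ih
      rw [redistLoopA, if_pos hpos, hits, if_pos hpos]
      have hidx' : (if index = red.length - 1 then 0 else index + 1) < red.length := by
        split_ifs <;> omega
      have hset : (red.set (if index = red.length - 1 then 0 else index + 1)
          ((red.getD (if index = red.length - 1 then 0 else index + 1) 0) + 1)).length
          = red.length := by simp
      rw [ih (by rw [hset]; exact hidx'), hset, getD_set _ _ _ _ hidx']
      by_cases hij : i = (if index = red.length - 1 then 0 else index + 1)
      · subst hij; rw [if_pos rfl, if_pos rfl]; omega
      · rw [if_neg (fun hh => hij hh.symm), if_neg hij]; omega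
  | case2 value index red hpos =>
      rw [redistLoopA, if_neg hpos, hits_nonpos _ _ _ _ hpos]
      omega

lemma getElem_enumerate (xs : List Int) (s : Int) (i : Nat) (h : i < xs.length) :
    (PySem.List.enumerate xs s)[i]'(by simpa [PySem.List.length_enumerate] using h)
      = (s + i, xs[i]) := by
  induction xs generalizing s i with
  | nil => simp at h
  | cons x t ih =>
      cases i with
      | zero => simp [PySem.List.enumerate_cons]
      | succ j =>
          have hj : j < t.length := by simpa using h
          have e1 : (PySem.List.enumerate (x :: t) s)[j + 1]'(by
              simpa [PySem.List.length_enumerate] using h) =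
              (PySem.List.enumerate t (s + 1))[j]'(by
                simpa [PySem.List.length_enumerate] using hj) := by
            simp [PySem.List.enumerate_cons]
          rw [e1, ih (s + 1) j hj]
          have e2 : s + 1 + (j : Int) = s + ((j + 1 : Nat) : Int) := by push_cast; ring
          rw [List.getElem_cons_succ, e2]

-- ===== VERDICT (by name: the statement is the Claim_ definition above) =====
theorem redistribute_memory_spec : Claim_equal_redistribute_memory := by
  intro memory _ hpre
  unfold Spec_redistribute_memory redistribute_memory redistribute_memory_alt
  obtain ⟨value, hmax⟩ : ∃ v, PySem.List.max? memory (fun y => y) = some v := by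
    rcases h : PySem.List.max? memory (fun y => y) with _ | v
    · exact absurd ((PySem.List.max?_eq_none_iff _ _).mp h) hpre
    · exact ⟨v, rfl⟩
  have hmem : value ∈ memory := PySem.List.max?_mem hmax
  obtain ⟨index, hidxeq⟩ : ∃ k, PySem.List.index? memory value = some k := by
    rcases h : PySem.List.index? memory value with _ | k
    · exact absurd hmem ((PySem.List.index?_eq_none_iff _ _).mp h)
    · exact ⟨k, rfl⟩
  obtain ⟨hk, _, _⟩ := PySem.List.getElem_of_index?_eq_some hidxeq
  simp only [hmax, hidxeq]
  have hn : 0 < memory.length := by omega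
  have hn' : (0 : Int) < (memory.length : Int) := by exact_mod_cast hn
  apply List.ext_getElem
  · rw [redistLoopA_length]
    simp [PySem.List.length_enumerate]
  · intro i h1 h2
    have hi : i < memory.length := by
      have := redistLoopA_length value index (memory.set index 0)
      simp [this] at h1; simpa using h1
    have hL : (redistLoopA value index (memory.set index 0))[i]'h1 =
        (redistLoopA value index (memory.set index 0)).getD i 0 := by
      rw [List.getD_eq_getElem _ _ h1]
    rw [hL, redistLoopA_getD _ _ _ (by simpa using hk) i]
    rw [List.length_set, getD_set _ _ _ _ hk]
    have hmapi : ((PySem.List.enumerate memory 0).map (fun p =>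
        (if p.1 = (index : Int) then 0 else p.2) +
          (if 0 < value then PySem.Int.floordiv value memory.length else 0) +
        (if PySem.Int.mod (p.1 - index - 1) memory.length <
              (if 0 < value then PySem.Int.mod value memory.length else 0)
          then 1 else 0)))[i]'h2 =
        (if (0 : Int) + i = (index : Int) then 0 else memory[i]'hi) +
          (if 0 < value then PySem.Int.floordiv value memory.length else 0) +
        (if PySem.Int.mod ((0 : Int) + i - index - 1) memory.length <
              (if 0 < value then PySem.Int.mod value memory.length else 0)
          then 1 else 0) := by
      rw [List.getElem_map, getElem_enumerate memory 0 i hi]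
    rw [hmapi]
    have hfd : PySem.Int.floordiv value memory.length = value / (memory.length : Int) :=
      PySem.Int.floordiv_eq_ediv_of_pos hn'
    have hmd : ∀ a : Int, PySem.Int.mod a memory.length = a % (memory.length : Int) :=
      fun a => PySem.Int.mod_eq_emod_of_pos hn'
    simp only [hfd, hmd]
    have e0 : (0 : Int) + i = (i : Int) := by ring
    rw [e0]
    rw [show memory.getD i 0 = memory[i]'hi from List.getD_eq_getElem _ _ hi]
    by_cases hvpos : 0 < value
    · rw [hits_eq memory.length i hn hi value (by omega) index hk]
      simp only [if_pos hvpos]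
      split_ifs <;> omega
    · rw [hits_nonpos _ _ _ _ hvpos]
      simp only [if_neg hvpos]
      have hd0 : 0 ≤ ((i : Int) - index - 1) % (memory.length : Int) :=
        Int.emod_nonneg _ (by omega)
      split_ifs <;> omega
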